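-- pv_equiv track=rewrite | github.com/pypi-data/pypi-mirror-98 | packages/LbNightlyTools/LbNightlyTools-3.0.28.tar.gz/LbNightlyTools-3.0.28/python/LbNightlyTools/BuildLogScanner.py | split_build_log
-- ===== SOURCE A (Python) =====
-- def split_build_log(iterable):
--     '''
--     Split a build.log file in chunks.
--
--     @return a list of pairs [(chunk_id, lines)]
--     '''
--     chunks = []
--     lines = []
--     chunks.append(('None', lines))
--     for line in iterable:
--         if line.startswith('# Building package'):
--             lines = [line]
--             chunk_id = line.split()[3]
--             chunks.append((chunk_id, lines))
--         elif line.startswith('#### CMake'):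
--             lines = []
--             chunk_id = line.split()[-2]
--             chunks.append((chunk_id, lines))
--         else:
--             lines.append(line)
--     if chunks[0] == ('None', []):
--         chunks.pop(0)
--     return chunks
-- ===== SOURCE B (Python) =====
-- def split_build_log(iterable):
--     '''
--     Split a build.log file in chunks.
--
--     @return a list of pairs [(chunk_id, lines)]
--     '''
--     lines = list(iterable)
--     bounds = []
--     for i, line in enumerate(lines):
--         if line.startswith('# Building package'):
--             bounds.append((i, line.split()[3], True))
--         elif line.startswith('#### CMake'):
--             bounds.append((i, line.split()[-2], False))
--     ends = [s for s, _, _ in bounds] + [len(lines)]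
--     chunks = [(cid, lines[(s if inc else s + 1):e])
--               for (s, cid, inc), e in zip(bounds, ends[1:])]
--     head = lines[:ends[0]]
--     return ([('None', head)] if head else []) + chunks
-- ===== Notes on version B (the rewrite author's own statement) =====
-- stated objective: alternative
-- what changed: B materializes the lines, makes one pass collecting marker boundary records (index, chunk id, whether the marker line is kept), then builds every chunk by slicing between consecutive boundaries; A builds chunks incrementally in one loop by mutating an aliased current-lines list and popping an empty leading chunk afterwards.
import Mathlib
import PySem

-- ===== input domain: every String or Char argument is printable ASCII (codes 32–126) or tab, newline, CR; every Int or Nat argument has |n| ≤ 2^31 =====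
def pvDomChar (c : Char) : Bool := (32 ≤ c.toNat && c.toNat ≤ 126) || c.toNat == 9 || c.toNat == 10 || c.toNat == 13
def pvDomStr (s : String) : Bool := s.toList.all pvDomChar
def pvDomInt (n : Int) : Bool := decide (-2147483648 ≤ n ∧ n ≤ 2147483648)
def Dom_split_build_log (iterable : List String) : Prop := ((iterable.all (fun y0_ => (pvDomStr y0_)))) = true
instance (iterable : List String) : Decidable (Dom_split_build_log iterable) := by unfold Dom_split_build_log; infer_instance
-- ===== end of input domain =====

-- B rebuilds the chunks by collecting marker boundary indices in one pass and slicing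
-- between consecutive boundaries (alternative decomposition, same cost as A).

-- ===== PORT A =====
-- A's loop state: (finished chunks, current (chunk_id, lines)); the aliased mutable
-- `lines` list of the Python is the current component, appended to `chunks` when replaced.
def split_build_log (iterable : List String) : List (String × List String) :=
  let st := iterable.foldl
    (fun (st : List (String × List String) × String × List String) line =>
      if PySem.Str.startswith line "# Building package" then
        (st.1 ++ [st.2], ((PySem.List.pyGet? (PySem.Str.split₀ line) 3).getD "", [line]))
      else if PySem.Str.startswith line "#### CMake" then
        (st.1 ++ [st.2], ((PySem.List.pyGet? (PySem.Str.split₀ line) (-2)).getD "", []))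
      else
        (st.1, (st.2.1, st.2.2 ++ [line])))
    ([], ("None", []))
  let chunks := st.1 ++ [st.2]
  match chunks with
  | [] => []
  | c :: rest => if c = ("None", ([] : List String)) then rest else c :: rest

-- ===== PORT B =====
-- B: one pass over enumerate(lines) collecting (index, chunk_id, keep-marker-line)
-- boundary records, then each chunk is a slice of `lines` between consecutive boundaries.
def split_build_log_alt (iterable : List String) : List (String × List String) :=
  let lines := iterable
  let bounds := (PySem.List.enumerate lines 0).foldl
    (fun (bs : List (Int × String × Bool)) p =>
      if PySem.Str.startswith p.2 "# Building package" then
        bs ++ [(p.1, (PySem.List.pyGet? (PySem.Str.split₀ p.2) 3).getD "", true)]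
      else if PySem.Str.startswith p.2 "#### CMake" then
        bs ++ [(p.1, (PySem.List.pyGet? (PySem.Str.split₀ p.2) (-2)).getD "", false)]
      else bs) []
  let ends := bounds.map (·.1) ++ [(lines.length : Int)]
  let chunks := (bounds.zip (PySem.List.slice ends (some 1) none)).map
    (fun be =>
      (be.1.2.1,
       PySem.List.slice lines (some (if be.1.2.2 then be.1.1 else be.1.1 + 1)) (some be.2)))
  let head := PySem.List.slice lines none (some ((PySem.List.pyGet? ends 0).getD 0))
  (if head ≠ [] then [("None", head)] else []) ++ chunks

-- ===== PRECONDITION & SPEC =====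
-- Pre_ excludes inputs containing a '# Building package' marker line with fewer than
-- 4 whitespace-separated tokens, on which Python A raises IndexError (line.split()[3]).
def Pre_split_build_log (iterable : List String) : Prop :=
  ∀ line ∈ iterable, PySem.Str.startswith line "# Building package" = true →
    4 ≤ (PySem.Str.split₀ line).length
instance (iterable : List String) : Decidable (Pre_split_build_log iterable) := by
  unfold Pre_split_build_log; infer_instance

def pvWitness_split_build_log : List String :=
  ["start", "# Building package Foo v1", "done", "#### CMake step ok", "x"]

def Spec_split_build_log (iterable : List String) (out : List (String × List String)) : Prop := out = split_build_log_alt iterable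
instance (iterable : List String) (out : List (String × List String)) : Decidable (Spec_split_build_log iterable out) := by unfold Spec_split_build_log; infer_instance

-- ===== CLAIM (what is proved, stated in full; the proofs are below) =====
def Claim_equal_split_build_log : Prop := ∀ (iterable : List String), Dom_split_build_log iterable → Pre_split_build_log iterable → Spec_split_build_log iterable (split_build_log iterable)

-- ===== LEMMAS AND PROOFS =====

-- A's folded step function, a name for the lambda in port A
def pvStepA (st : List (String × List String) × String × List String) (line : String) :
    List (String × List String) × String × List String :=
  if PySem.Str.startswith line "# Building package" then
    (st.1 ++ [st.2], ((PySem.List.pyGet? (PySem.Str.split₀ line) 3).getD "", [line]))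
  else if PySem.Str.startswith line "#### CMake" then
    (st.1 ++ [st.2], ((PySem.List.pyGet? (PySem.Str.split₀ line) (-2)).getD "", []))
  else
    (st.1, (st.2.1, st.2.2 ++ [line]))

-- common recursive reference: chunks of ls given the current open chunk `cur`
def pvChunksFrom (cur : String × List String) : List String → List (String × List String)
  | [] => [cur]
  | l :: ls =>
    if PySem.Str.startswith l "# Building package" then
      cur :: pvChunksFrom ((PySem.List.pyGet? (PySem.Str.split₀ l) 3).getD "", [l]) ls
    else if PySem.Str.startswith l "#### CMake" then
      cur :: pvChunksFrom ((PySem.List.pyGet? (PySem.Str.split₀ l) (-2)).getD "", []) ls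
    else
      pvChunksFrom (cur.1, cur.2 ++ [l]) ls

-- parse the whole list: (lines before the first marker, chunks from the first marker on)
def pvParse : List String → List String × List (String × List String)
  | [] => ([], [])
  | l :: ls =>
    if PySem.Str.startswith l "# Building package" then
      ([], ((PySem.List.pyGet? (PySem.Str.split₀ l) 3).getD "", l :: (pvParse ls).1) :: (pvParse ls).2)
    else if PySem.Str.startswith l "#### CMake" then
      ([], ((PySem.List.pyGet? (PySem.Str.split₀ l) (-2)).getD "", (pvParse ls).1) :: (pvParse ls).2)
    else
      (l :: (pvParse ls).1, (pvParse ls).2)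

-- A's fold produces exactly `done ++ pvChunksFrom cur ls`
lemma pvFoldA_eq (ls : List String) :
    ∀ (done : List (String × List String)) (cur : String × List String),
    (ls.foldl pvStepA (done, cur)).1 ++ [(ls.foldl pvStepA (done, cur)).2] =
      done ++ pvChunksFrom cur ls := by
  induction ls with
  | nil => intro done cur; simp [pvChunksFrom]
  | cons l ls ih =>
    intro done cur
    simp only [List.foldl_cons, pvChunksFrom]
    by_cases h1 : PySem.Str.startswith l "# Building package" = true
    · rw [show pvStepA (done, cur) l
          = (done ++ [cur], ((PySem.List.pyGet? (PySem.Str.split₀ l) 3).getD "", [l]))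
          from by simp only [pvStepA]; rw [if_pos h1], ih, if_pos h1]
      simp
    · by_cases h2 : PySem.Str.startswith l "#### CMake" = true
      · rw [show pvStepA (done, cur) l
            = (done ++ [cur], ((PySem.List.pyGet? (PySem.Str.split₀ l) (-2)).getD "", []))
            from by simp only [pvStepA]; rw [if_neg h1, if_pos h2], ih, if_neg h1, if_pos h2]
        simp
      · rw [show pvStepA (done, cur) l = (done, (cur.1, cur.2 ++ [l]))
            from by simp only [pvStepA]; rw [if_neg h1, if_neg h2], ih, if_neg h1, if_neg h2]

-- pvChunksFrom in terms of pvParse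
lemma pvChunksFrom_eq_parse (ls : List String) :
    ∀ cur, pvChunksFrom cur ls = (cur.1, cur.2 ++ (pvParse ls).1) :: (pvParse ls).2 := by
  induction ls with
  | nil => intro cur; simp [pvChunksFrom, pvParse]
  | cons l ls ih =>
    intro cur
    simp only [pvChunksFrom, pvParse]
    by_cases h1 : PySem.Str.startswith l "# Building package" = true
    · rw [if_pos h1, if_pos h1, ih]; simp
    · by_cases h2 : PySem.Str.startswith l "#### CMake" = true
      · rw [if_neg h1, if_pos h2, if_neg h1, if_pos h2, ih]; simp
      · rw [if_neg h1, if_neg h2, if_neg h1, if_neg h2, ih]; simp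

-- B's folded step function, a name for the lambda in port B
def pvStepB (bs : List (Int × String × Bool)) (p : Int × String) : List (Int × String × Bool) :=
  if PySem.Str.startswith p.2 "# Building package" then
    bs ++ [(p.1, (PySem.List.pyGet? (PySem.Str.split₀ p.2) 3).getD "", true)]
  else if PySem.Str.startswith p.2 "#### CMake" then
    bs ++ [(p.1, (PySem.List.pyGet? (PySem.Str.split₀ p.2) (-2)).getD "", false)]
  else bs

-- Nat-indexed boundary records (lemma-level mirror of port B's bounds list)
def pvBoundsN (i : Nat) : List String → List (Nat × String × Bool)
  | [] => []
  | l :: ls =>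
    if PySem.Str.startswith l "# Building package" then
      (i, (PySem.List.pyGet? (PySem.Str.split₀ l) 3).getD "", true) :: pvBoundsN (i + 1) ls
    else if PySem.Str.startswith l "#### CMake" then
      (i, (PySem.List.pyGet? (PySem.Str.split₀ l) (-2)).getD "", false) :: pvBoundsN (i + 1) ls
    else pvBoundsN (i + 1) ls

def pvCast (b : Nat × String × Bool) : Int × String × Bool := ((b.1 : Int), b.2)

-- the enumerate fold of port B computes exactly the (cast) boundary records
lemma pvFoldB_eq (ls : List String) :
    ∀ (i : Nat) (acc : List (Int × String × Bool)),
    (PySem.List.enumerate ls (i : Int)).foldl pvStepB acc = acc ++ (pvBoundsN i ls).map pvCast := by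
  induction ls with
  | nil => intro i acc; simp [PySem.List.enumerate_nil, pvBoundsN]
  | cons l ls ih =>
    intro i acc
    rw [PySem.List.enumerate_cons]
    simp only [List.foldl_cons, pvBoundsN]
    have hcast : (i : Int) + 1 = ((i + 1 : Nat) : Int) := by push_cast; ring
    by_cases h1 : PySem.Str.startswith l "# Building package" = true
    · rw [show pvStepB acc ((i : Int), l)
          = acc ++ [((i : Int), (PySem.List.pyGet? (PySem.Str.split₀ l) 3).getD "", true)]
          from by simp only [pvStepB]; rw [if_pos h1], hcast, ih, if_pos h1]
      simp [pvCast]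
    · by_cases h2 : PySem.Str.startswith l "#### CMake" = true
      · rw [show pvStepB acc ((i : Int), l)
            = acc ++ [((i : Int), (PySem.List.pyGet? (PySem.Str.split₀ l) (-2)).getD "", false)]
            from by simp only [pvStepB]; rw [if_neg h1, if_pos h2], hcast, ih, if_neg h1, if_pos h2]
        simp [pvCast]
      · rw [show pvStepB acc ((i : Int), l) = acc from by simp only [pvStepB]; rw [if_neg h1, if_neg h2],
            hcast, ih, if_neg h1, if_neg h2]

-- first chunk end: index of the first boundary, or the length of the log
def pvEnd0N (bs : List (Nat × String × Bool)) (len : Nat) : Nat :=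
  (bs.map (·.1) ++ [len]).headD 0

-- Int-level mirror of port B's ends/zip/slice chunk construction
def pvMkChunksI (L : List String) (bs : List (Int × String × Bool)) : List (String × List String) :=
  (bs.zip (PySem.List.slice (bs.map (·.1) ++ [(L.length : Int)]) (some 1) none)).map
    (fun be =>
      (be.1.2.1,
       PySem.List.slice L (some (if be.1.2.2 then be.1.1 else be.1.1 + 1)) (some be.2)))

-- Nat-level mirror of the same construction
def pvMkChunksN (L : List String) (bs : List (Nat × String × Bool)) : List (String × List String) :=
  (bs.zip ((bs.map (·.1) ++ [L.length]).tail)).map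
    (fun be =>
      (be.1.2.1,
       PySem.List.slice L (some ((if be.1.2.2 then be.1.1 else be.1.1 + 1 : Nat) : Int)) (some (be.2 : Int))))

lemma pvMkChunksN_cons (L : List String) (b : Nat × String × Bool) (bs : List (Nat × String × Bool)) :
    pvMkChunksN L (b :: bs) =
      (b.2.1, PySem.List.slice L (some ((if b.2.2 then b.1 else b.1 + 1 : Nat) : Int))
          (some ((pvEnd0N bs L.length : Nat) : Int))) :: pvMkChunksN L bs := by
  cases bs <;> simp [pvMkChunksN, pvEnd0N]

lemma pvMkChunksI_cons (L : List String) (b : Int × String × Bool) (bs : List (Int × String × Bool)) :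
    pvMkChunksI L (b :: bs) =
      (b.2.1, PySem.List.slice L (some (if b.2.2 then b.1 else b.1 + 1))
          (some ((bs.map (·.1) ++ [(L.length : Int)]).headD 0))) :: pvMkChunksI L bs := by
  cases bs <;> simp [pvMkChunksI, PySem.List.slice_from_one]

-- the Int-level construction on cast boundaries is the Nat-level construction
lemma pvMkChunks_map (L : List String) (bs : List (Nat × String × Bool)) :
    pvMkChunksI L (bs.map pvCast) = pvMkChunksN L bs := by
  induction bs with
  | nil => simp [pvMkChunksI, pvMkChunksN]
  | cons b bs ih =>
    rw [List.map_cons, pvMkChunksI_cons, pvMkChunksN_cons, ih]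
    have he : ((bs.map pvCast).map (·.1) ++ [(L.length : Int)]).headD 0
        = ((pvEnd0N bs L.length : Nat) : Int) := by
      cases bs <;> simp [pvEnd0N, pvCast]
    have hs : (if (pvCast b).2.2 then (pvCast b).1 else (pvCast b).1 + 1)
        = ((if b.2.2 then b.1 else b.1 + 1 : Nat) : Int) := by
      cases hb : b.2.2 <;> simp [pvCast, hb]
    rw [he, hs]
    simp [pvCast]

-- the first-chunk end lies between the current index and the length of the log
lemma pvEnd0N_bounds (ls : List String) :
    ∀ (pre : List String),
      pre.length ≤ pvEnd0N (pvBoundsN pre.length ls) (pre ++ ls).length ∧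
      pvEnd0N (pvBoundsN pre.length ls) (pre ++ ls).length ≤ (pre ++ ls).length := by
  induction ls with
  | nil => intro pre; simp [pvBoundsN, pvEnd0N]
  | cons l ls ih =>
    intro pre
    simp only [pvBoundsN]
    by_cases h1 : PySem.Str.startswith l "# Building package" = true
    · rw [if_pos h1]; simp [pvEnd0N]
    · by_cases h2 : PySem.Str.startswith l "#### CMake" = true
      · rw [if_neg h1, if_pos h2]; simp [pvEnd0N]
      · rw [if_neg h1, if_neg h2]
        have := ih (pre ++ [l])
        simp [List.length_append, List.length_cons] at this ⊢
        omega

-- peel the element at index a off a slice [a:b] with a < b, a < length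
lemma pvSlice_cons (L : List String) (a b : Nat) (hab : a < b) (ha : a < L.length) :
    PySem.List.slice L (some (a : Int)) (some (b : Int)) =
      L[a] :: PySem.List.slice L (some ((a + 1 : Nat) : Int)) (some (b : Int)) := by
  rw [PySem.List.slice_natCast, PySem.List.slice_natCast,
      show b - a = (b - (a + 1)) + 1 from by omega,
      List.drop_eq_getElem_cons ha, List.take_succ_cons]

-- the core correspondence: slices between boundaries compute pvParse
lemma pvCore (ls : List String) :
    ∀ (pre : List String),
      PySem.List.slice (pre ++ ls) (some (pre.length : Int))
          (some ((pvEnd0N (pvBoundsN pre.length ls) (pre ++ ls).length : Nat) : Int)) = (pvParse ls).1 ∧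
      pvMkChunksN (pre ++ ls) (pvBoundsN pre.length ls) = (pvParse ls).2 := by
  induction ls with
  | nil =>
    intro pre
    constructor
    · simp [pvBoundsN, pvEnd0N, pvParse, PySem.List.slice_natCast]
    · simp [pvBoundsN, pvMkChunksN, pvParse]
  | cons l ls ih =>
    intro pre
    rw [show pre ++ l :: ls = (pre ++ [l]) ++ ls from by simp]
    have hqlen : (pre ++ [l]).length = pre.length + 1 := by simp
    have ih' := ih (pre ++ [l]); rw [hqlen] at ih'
    have hb := pvEnd0N_bounds ls (pre ++ [l]); rw [hqlen] at hb
    have hlen : pre.length < ((pre ++ [l]) ++ ls).length := by simp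
    have hgl : ((pre ++ [l]) ++ ls)[pre.length]'hlen = l := by
      rw [List.getElem_append_left (by simp)]
      simp
    simp only [pvBoundsN, pvParse]
    by_cases h1 : PySem.Str.startswith l "# Building package" = true
    · rw [if_pos h1, if_pos h1]
      refine ⟨?_, ?_⟩
      · rw [show pvEnd0N ((pre.length, (PySem.List.pyGet? (PySem.Str.split₀ l) 3).getD "", true)
              :: pvBoundsN (pre.length + 1) ls) ((pre ++ [l]) ++ ls).length = pre.length from by
            simp [pvEnd0N]]
        simp [PySem.List.slice_natCast]
      · rw [pvMkChunksN_cons]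
        rw [if_pos (rfl : (true = true))]
        rw [pvSlice_cons ((pre ++ [l]) ++ ls) pre.length _ (by omega) hlen, hgl, ih'.1, ih'.2]
    · by_cases h2 : PySem.Str.startswith l "#### CMake" = true
      · rw [if_neg h1, if_pos h2, if_neg h1, if_pos h2]
        refine ⟨?_, ?_⟩
        · rw [show pvEnd0N ((pre.length, (PySem.List.pyGet? (PySem.Str.split₀ l) (-2)).getD "", false)
                :: pvBoundsN (pre.length + 1) ls) ((pre ++ [l]) ++ ls).length = pre.length from by
              simp [pvEnd0N]]
          simp [PySem.List.slice_natCast]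
        · rw [pvMkChunksN_cons]
          rw [if_neg (by decide : ¬(false = true))]
          rw [ih'.1, ih'.2]
      · rw [if_neg h1, if_neg h2, if_neg h1, if_neg h2]
        refine ⟨?_, ?_⟩
        · rw [pvSlice_cons ((pre ++ [l]) ++ ls) pre.length _ (by omega) hlen, hgl, ih'.1]
        · rw [ih'.2]

theorem pv_main (iterable : List String) :
    split_build_log iterable = split_build_log_alt iterable := by
  -- A in terms of pvParse
  have eA : split_build_log iterable =
      (if (pvParse iterable).1 = ([] : List String)
       then (pvParse iterable).2
       else ("None", (pvParse iterable).1) :: (pvParse iterable).2) := by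
    show (match (iterable.foldl pvStepA ([], ("None", []))).1
              ++ [(iterable.foldl pvStepA ([], ("None", []))).2] with
          | [] => ([] : List (String × List String))
          | c :: rest => if c = ("None", ([] : List String)) then rest else c :: rest) = _
    rw [pvFoldA_eq iterable [] ("None", []), pvChunksFrom_eq_parse]
    by_cases h : (pvParse iterable).1 = [] <;> simp [h]
  -- B in terms of pvParse
  have hbounds : (PySem.List.enumerate iterable (0 : Int)).foldl pvStepB []
      = (pvBoundsN 0 iterable).map pvCast := by
    simpa using pvFoldB_eq iterable 0 []
  have hcore := pvCore iterable []
  simp only [List.nil_append, List.length_nil] at hcore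
  have eB : split_build_log_alt iterable =
      (if (pvParse iterable).1 ≠ [] then [("None", (pvParse iterable).1)] else [])
        ++ (pvParse iterable).2 := by
    show (let bounds := (PySem.List.enumerate iterable (0 : Int)).foldl pvStepB []
          let ends := bounds.map (·.1) ++ [(iterable.length : Int)]
          let chunks := pvMkChunksI iterable bounds
          let head := PySem.List.slice iterable none (some ((PySem.List.pyGet? ends 0).getD 0))
          (if head ≠ [] then [("None", head)] else []) ++ chunks) = _
    simp only [hbounds]
    have hends0 : (PySem.List.pyGet?
          (((pvBoundsN 0 iterable).map pvCast).map (·.1) ++ [(iterable.length : Int)]) 0).getD 0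
        = ((pvEnd0N (pvBoundsN 0 iterable) iterable.length : Nat) : Int) := by
      cases h : pvBoundsN 0 iterable with
      | nil => simp [pvEnd0N, PySem.List.pyGet?, PySem.List.pyIdx?]
      | cons b bs =>
        have hp : (0 : Int) ≤ (bs.length : Int) + 1 := by positivity
        simp [pvEnd0N, pvCast, PySem.List.pyGet?, PySem.List.pyIdx?, hp]
    have hhead : PySem.List.slice iterable none
          (some ((pvEnd0N (pvBoundsN 0 iterable) iterable.length : Nat) : Int))
        = (pvParse iterable).1 := by
      have h0 := hcore.1
      rw [show ((0 : Nat) : Int) = (0 : Int) from rfl, PySem.List.slice_zero_start] at h0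
      exact h0
    rw [hends0, hhead, pvMkChunks_map iterable (pvBoundsN 0 iterable), hcore.2]
  rw [eA, eB]
  by_cases h : (pvParse iterable).1 = []
  · simp [h]
  · simp [h]

-- ===== VERDICT (by name: the statement is the Claim_ definition above) =====
theorem split_build_log_spec : Claim_equal_split_build_log := by
  intro iterable _ _
  unfold Spec_split_build_log
  exact pv_main iterable
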